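-- pv_equiv track=rewrite | github.com/aseemaparveenaz/cg-seleniumpython-training | practice/ducci.py | ducci_sequence
-- ===== SOURCE A (Python) =====
-- def ducci_sequence(test_list, n):
--     final_list = []
--     for i in range(n + 1):
--         temp = []
--         for x in range(-1, -5, -1):
--             temp.insert(0, abs(test_list[x] - test_list[x + 1]))
--         test_list = temp
--         final_list.append(temp)
--     return final_list[n]
-- ===== SOURCE B (Python) =====
-- def ducci_sequence(test_list, n):
--     # Build the state after one Ducci step (A's step uses the last four
--     # elements and wraps to the first), then iterate on 4-tuples with
--     # cycle detection: stop as soon as a state repeats and index by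
--     # n modulo the cycle length.
--     state = (abs(test_list[-4] - test_list[-3]),
--              abs(test_list[-3] - test_list[-2]),
--              abs(test_list[-2] - test_list[-1]),
--              abs(test_list[-1] - test_list[0]))
--     seen = {state: 0}
--     seq = [state]
--     for i in range(1, n + 1):
--         a, b, c, d = state
--         state = (abs(a - b), abs(b - c), abs(c - d), abs(d - a))
--         if state in seen:
--             j = seen[state]
--             idx = j + (n - j) % (i - j)
--             return list(seq[idx])
--         seen[state] = i
--         seq.append(state)
--     return list(state)
-- ===== Notes on version B (the rewrite author's own statement) =====
-- stated objective: faster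
-- what changed: A rebuilds a Python list per step and stores all n+1 intermediate lists; B runs the Ducci step on a 4-tuple with a seen-states dict and, on the first repeated state, answers by indexing n modulo the cycle length, so it stops after at most one full cycle.
import Mathlib
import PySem

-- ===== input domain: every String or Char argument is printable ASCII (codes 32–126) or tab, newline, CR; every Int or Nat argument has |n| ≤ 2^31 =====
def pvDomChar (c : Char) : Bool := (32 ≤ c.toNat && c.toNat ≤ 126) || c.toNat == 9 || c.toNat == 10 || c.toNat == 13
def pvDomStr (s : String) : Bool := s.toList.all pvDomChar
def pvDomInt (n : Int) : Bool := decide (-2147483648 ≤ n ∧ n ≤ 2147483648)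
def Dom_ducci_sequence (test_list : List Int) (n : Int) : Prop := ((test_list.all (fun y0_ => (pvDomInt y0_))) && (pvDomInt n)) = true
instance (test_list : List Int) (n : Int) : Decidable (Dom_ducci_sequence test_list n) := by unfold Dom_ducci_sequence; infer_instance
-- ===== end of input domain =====

-- B replaces A's rebuild-a-list-per-step loop of n+1 iterations by Ducci iteration
-- on 4-tuples with cycle detection (a seen-states dict, then index n modulo the
-- cycle length): asymptotically faster in n.

-- ===== PORT A =====
-- inner loop 'for x in range(-1, -5, -1): temp.insert(0, abs(test_list[x] - test_list[x+1]))'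
def ducciStepA (t : List Int) : List Int :=
  (PySem.List.pyRange (-1) (-5) (-1)).foldl
    (fun temp x =>
      PySem.List.insert temp 0 |PySem.List.pyGetD t x 0 - PySem.List.pyGetD t (x + 1) 0|) []

def ducci_sequence (test_list : List Int) (n : Int) : List Int :=
  let r := (PySem.List.pyRange 0 (n + 1) 1).foldl
    (fun (p : List (List Int) × List Int) _ =>
      let temp := ducciStepA p.2
      (p.1 ++ [temp], temp)) ([], test_list)
  PySem.List.pyGetD r.1 n []

-- ===== PORT B =====
-- one Ducci step on a 4-tuple state
def ducciStepB (s : Int × Int × Int × Int) : Int × Int × Int × Int :=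
  (|s.1 - s.2.1|, |s.2.1 - s.2.2.1|, |s.2.2.1 - s.2.2.2|, |s.2.2.2 - s.1|)

-- 'list(state)'
def tupToList (s : Int × Int × Int × Int) : List Int := [s.1, s.2.1, s.2.2.1, s.2.2.2]

-- the initial state built from the input list (B's first tuple expression)
def ducciInit (t : List Int) : Int × Int × Int × Int :=
  (|PySem.List.pyGetD t (-4) 0 - PySem.List.pyGetD t (-3) 0|,
   |PySem.List.pyGetD t (-3) 0 - PySem.List.pyGetD t (-2) 0|,
   |PySem.List.pyGetD t (-2) 0 - PySem.List.pyGetD t (-1) 0|,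
   |PySem.List.pyGetD t (-1) 0 - PySem.List.pyGetD t 0 0|)

-- 'for i in range(1, n+1): … return …' with the early return on a repeated state
def ducciLoop (n : Int) (state : Int × Int × Int × Int)
    (seen : PySem.Dict (Int × Int × Int × Int) Int)
    (seq : List (Int × Int × Int × Int)) (i : Int) : List Int :=
  if _h : i ≤ n then
    let st := ducciStepB state
    match seen.get? st with
    | some j => tupToList (PySem.List.pyGetD seq (j + PySem.Int.mod (n - j) (i - j)) st)
    | none => ducciLoop n st (seen.insert st i) (seq ++ [st]) (i + 1)
  else tupToList state
termination_by (n + 1 - i).toNat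
decreasing_by omega

def ducci_sequence_alt (test_list : List Int) (n : Int) : List Int :=
  let state := ducciInit test_list
  ducciLoop n state (PySem.Dict.empty.insert state 0) [state] 1

-- ===== PRECONDITION & SPEC =====
-- A raises IndexError when the list has fewer than 4 elements (index -4) or when
-- n < 0 (final_list[n] on a too-short list); exactly those inputs are excluded.
def Pre_ducci_sequence (test_list : List Int) (n : Int) : Prop :=
  4 ≤ test_list.length ∧ 0 ≤ n
instance (test_list : List Int) (n : Int) : Decidable (Pre_ducci_sequence test_list n) := by
  unfold Pre_ducci_sequence; infer_instance

def pvWitness_ducci_sequence : List Int × Int := ([1, 2, 3, 4], 2)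

def Spec_ducci_sequence (test_list : List Int) (n : Int) (out : List Int) : Prop :=
  out = ducci_sequence_alt test_list n
instance (test_list : List Int) (n : Int) (out : List Int) : Decidable (Spec_ducci_sequence test_list n out) := by
  unfold Spec_ducci_sequence; infer_instance

-- ===== CLAIM (what is proved, stated in full; the proofs are below) =====
def Claim_equal_ducci_sequence : Prop := ∀ (test_list : List Int) (n : Int), Dom_ducci_sequence test_list n → Pre_ducci_sequence test_list n → Spec_ducci_sequence test_list n (ducci_sequence test_list n)

-- ===== LEMMAS AND PROOFS =====

-- list.insert(0, v) prepends
lemma insert_zero {a : Type} (xs : List a) (v : a) : PySem.List.insert xs 0 v = v :: xs := by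
  simp [PySem.List.insert, PySem.List.sliceIndices]

-- A's inner loop computes the four wrap-around differences, i.e. B's initial tuple.
lemma stepA_eq (t : List Int) : ducciStepA t = tupToList (ducciInit t) := by
  have hr : PySem.List.pyRange (-1) (-5) (-1) = [-1, -2, -3, -4] := by decide
  rw [ducciStepA, hr]
  simp only [List.foldl_cons, List.foldl_nil, insert_zero]
  norm_num [tupToList, ducciInit]

-- pyGetD on a literal 4-element list
set_option maxHeartbeats 1000000 in
lemma pyGetD_lit (a b c d : Int) :
    PySem.List.pyGetD [a, b, c, d] (-4) 0 = a ∧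
    PySem.List.pyGetD [a, b, c, d] (-3) 0 = b ∧
    PySem.List.pyGetD [a, b, c, d] (-2) 0 = c ∧
    PySem.List.pyGetD [a, b, c, d] (-1) 0 = d ∧
    PySem.List.pyGetD [a, b, c, d] 0 0 = a := by
  refine ⟨?_, ?_, ?_, ?_, ?_⟩ <;> simp [pysem]

lemma stepA_tup (s : Int × Int × Int × Int) :
    ducciStepA (tupToList s) = tupToList (ducciStepB s) := by
  obtain ⟨a, b, c, d⟩ := s
  obtain ⟨h1, h2, h3, h4, h5⟩ := pyGetD_lit a b c d
  rw [stepA_eq]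
  simp only [ducciInit, ducciStepB, tupToList, h1, h2, h3, h4, h5]

-- iterating A's step from any list lands on B's tuple orbit
lemma stepA_iterate (t : List Int) (k : ℕ) :
    ducciStepA^[k + 1] t = tupToList (ducciStepB^[k] (ducciInit t)) := by
  induction k with
  | zero => simpa using stepA_eq t
  | succ k ih =>
      rw [Function.iterate_succ_apply' (f := ducciStepA) (n := k + 1),
          ih, stepA_tup, ← Function.iterate_succ_apply' (f := ducciStepB)]

-- A's outer fold: the accumulated list is the orbit of stepA, the state its last point
lemma foldA (l : List Int) (fl : List (List Int)) (t : List Int) :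
    l.foldl (fun (p : List (List Int) × List Int) _ =>
        (p.1 ++ [ducciStepA p.2], ducciStepA p.2)) (fl, t)
      = (fl ++ (List.range l.length).map (fun k => ducciStepA^[k + 1] t),
         ducciStepA^[l.length] t) := by
  induction l generalizing fl t with
  | nil => simp
  | cons x l ih =>
      simp only [List.foldl_cons, ih, List.length_cons, Prod.mk.injEq]
      constructor
      · rw [List.range_succ_eq_map]
        simp [List.map_map, Function.comp_def, Function.iterate_succ_apply]
      · rw [Function.iterate_succ_apply]

-- the periodicity argument: a repeat at (j, j+p) determines every later iterate
lemma iterate_mod {α : Type} (f : α → α) (x : α) (j p : ℕ) (hp : 0 < p)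
    (h : f^[j + p] x = f^[j] x) :
    ∀ k, j ≤ k → f^[k] x = f^[j + (k - j) % p] x := by
  intro k
  induction k using Nat.strong_induction_on with
  | _ k ih =>
    intro hk
    by_cases hlt : k < j + p
    · rw [Nat.mod_eq_of_lt (by omega), Nat.add_sub_cancel' hk]
    · have e1 : f^[k] x = f^[k - p] x := by
        have h1 : k = (k - (j + p)) + (j + p) := by omega
        conv_lhs => rw [h1]
        rw [Function.iterate_add_apply, h, ← Function.iterate_add_apply]
        congr 1
        omega
      rw [e1, ih (k - p) (by omega) (by omega)]
      have h2 : k - j = (k - p - j) + p := by omega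
      rw [h2, Nat.add_mod_right]

-- the loop invariant of B's cycle-detection loop
lemma ducciLoop_eq (n : Int) (hn : 0 ≤ n) (s0 : Int × Int × Int × Int) :
    ∀ (fuel : ℕ) (i : Int) (state : Int × Int × Int × Int)
      (seen : PySem.Dict (Int × Int × Int × Int) Int)
      (seq : List (Int × Int × Int × Int)),
      (n + 1 - i).toNat = fuel →
      1 ≤ i → i ≤ n + 1 →
      state = ducciStepB^[i.toNat - 1] s0 →
      seq.length = i.toNat →
      (∀ k : ℕ, k < i.toNat → seq[k]? = some (ducciStepB^[k] s0)) →
      (∀ st j, seen.get? st = some j →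
          0 ≤ j ∧ j.toNat < i.toNat ∧ ducciStepB^[j.toNat] s0 = st) →
      ducciLoop n state seen seq i = tupToList (ducciStepB^[n.toNat] s0) := by
  intro fuel
  induction fuel using Nat.strong_induction_on with
  | _ fuel ih =>
    intro i state seen seq hfuel h1 h2 hstate hlen hseq hseen
    rw [ducciLoop]
    by_cases hin : i ≤ n
    · simp only [hin, dif_pos]
      have hiN : i.toNat - 1 + 1 = i.toNat := by omega
      have hst : ducciStepB state = ducciStepB^[i.toNat] s0 := by
        rw [hstate, ← Function.iterate_succ_apply' (f := ducciStepB)]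
        exact congrArg (fun m => ducciStepB^[m] s0) (show (i.toNat - 1).succ = i.toNat by omega)
      cases hget : seen.get? (ducciStepB state) with
      | some j =>
          obtain ⟨hj0, hjlt, hjeq⟩ := hseen _ _ hget
          -- repeat: f^[jN] = f^[iN]
          have hper : ducciStepB^[j.toNat + (i.toNat - j.toNat)] s0 = ducciStepB^[j.toNat] s0 := by
            have : j.toNat + (i.toNat - j.toNat) = i.toNat := by omega
            rw [this, ← hst, hjeq]
          have hjn : j.toNat ≤ n.toNat := by omega
          have hmain := iterate_mod ducciStepB s0 j.toNat (i.toNat - j.toNat)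
            (by omega) hper n.toNat hjn
          -- the Int index equals the Nat index
          set p : ℕ := i.toNat - j.toNat with hp
          set idxN : ℕ := j.toNat + (n.toNat - j.toNat) % p with hidx
          have hmodpos : (0 : Int) < i - j := by omega
          have hmod : j + PySem.Int.mod (n - j) (i - j) = (idxN : Int) := by
            rw [PySem.Int.mod_eq_emod_of_pos hmodpos]
            have e1 : n - j = ((n.toNat - j.toNat : ℕ) : Int) := by omega
            have e2 : i - j = ((p : ℕ) : Int) := by omega
            rw [e1, e2, ← Int.natCast_mod]
            omega
          have hidxlt : idxN < seq.length := by
            have : (n.toNat - j.toNat) % p < p := Nat.mod_lt _ (by omega)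
            omega
          show tupToList (PySem.List.pyGetD seq (j + PySem.Int.mod (n - j) (i - j)) (ducciStepB state))
              = tupToList (ducciStepB^[n.toNat] s0)
          rw [hmod, PySem.List.pyGetD_natCast]
          have := hseq idxN (by omega)
          rw [List.getD_eq_getElem?_getD, this]
          simp [hmain, hidx]
      | none =>
          show ducciLoop n (ducciStepB state) (seen.insert (ducciStepB state) i)
              (seq ++ [ducciStepB state]) (i + 1) = tupToList (ducciStepB^[n.toNat] s0)
          apply ih ((n + 1 - (i + 1)).toNat) (by omega) (i + 1) _ _ _ rfl (by omega) (by omega)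
          · rw [hst]; congr 1; omega
          · simp [hlen]; omega
          · intro k hk
            by_cases hk' : k < i.toNat
            · rw [List.getElem?_append_left (by omega), hseq k hk']
            · have hkk : k = i.toNat := by omega
              subst hkk
              rw [List.getElem?_append_right (by omega)]
              simp [hlen, hst]
          · intro st j hj
            rw [PySem.Dict.get?_insert] at hj
            split at hj
            · rename_i heq
              cases hj
              subst heq
              exact ⟨by omega, by omega, hst.symm⟩
            · obtain ⟨a1, a2, a3⟩ := hseen _ _ hj
              exact ⟨a1, by omega, a3⟩
    · simp only [hin, dif_neg, not_false_iff]
      have : i = n + 1 := by omega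
      subst this
      rw [hstate]
      congr 2
      omega

-- ===== VERDICT (by name: the statement is the Claim_ definition above) =====
theorem ducci_sequence_spec : Claim_equal_ducci_sequence := by
  intro test_list n _hdom hpre
  obtain ⟨hlen, hn⟩ := hpre
  obtain ⟨N, rfl⟩ : ∃ N : ℕ, n = (N : Int) := ⟨n.toNat, by omega⟩
  unfold Spec_ducci_sequence ducci_sequence ducci_sequence_alt
  -- A's side
  have hR : (PySem.List.pyRange 0 ((N : Int) + 1) 1).length = N + 1 := by
    rw [PySem.List.length_pyRange_one]; omega
  rw [foldA]
  simp only [hR]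
  have hA : PySem.List.pyGetD
      ((List.range (N + 1)).map (fun k => ducciStepA^[k + 1] test_list)) (N : Int) []
      = tupToList (ducciStepB^[N] (ducciInit test_list)) := by
    rw [PySem.List.pyGetD_natCast, List.getD_eq_getElem?_getD, List.getElem?_map,
        List.getElem?_range (by omega)]
    simpa using stepA_iterate test_list N
  rw [List.nil_append, hA]
  -- B's side
  rw [ducciLoop_eq (N : Int) (by omega) (ducciInit test_list) ((N : Int) + 1 - 1).toNat 1 _ _ _ rfl
      (by omega) (by omega) (by simp) (by simp)]
  · simp
  · intro k hk
    have : k = 0 := by omega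
    subst this
    simp
  · intro st j hj
    rw [PySem.Dict.get?_insert] at hj
    split at hj
    · rename_i heq
      cases hj
      subst heq
      exact ⟨le_refl 0, by omega, rfl⟩
    · simp [PySem.Dict.get?_empty] at hj
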